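-- pv_equiv track=rewrite | github.com/joshuariemer2106-boop/Programmkieren | ai_assistant.py | build_learning_steps
-- ===== SOURCE A (Python) =====
-- def build_learning_steps(results):
--     steps = []
--     for idx, item in enumerate(results[:3], start=1):
--         title = item.get("title") or "W3Schools Seite"
--         url = item.get("url") or "https://www.w3schools.com/"
--         steps.append(f"{idx}. Lies zuerst '{title}' und uebernimm ein Beispiel in dein Projekt: {url}")
--
--     while len(steps) < 3:
--         n = len(steps) + 1
--         steps.append(f"{n}. Baue ein kleines Beispiel, teste es lokal und notiere, was sich aendert.")
--     return steps
-- ===== SOURCE B (Python) =====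
-- def build_learning_steps(results):
--     def step(n, items):
--         if n > 3:
--             return []
--         if items:
--             item = items[0]
--             title = item.get("title") or "W3Schools Seite"
--             url = item.get("url") or "https://www.w3schools.com/"
--             head = f"{n}. Lies zuerst '{title}' und uebernimm ein Beispiel in dein Projekt: {url}"
--             return [head] + step(n + 1, items[1:])
--         head = f"{n}. Baue ein kleines Beispiel, teste es lokal und notiere, was sich aendert."
--         return [head] + step(n + 1, items)
--     return step(1, results)
-- ===== Notes on version B (the rewrite author's own statement) =====
-- stated objective: alternative
-- what changed: Replaces A's imperative two-phase loop-then-while-pad accumulation with a single recursive function that counts n from 1 to 3, consuming the result list and cons-building the output, emitting a formatted step while items remain and a placeholder afterwards.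
import Mathlib
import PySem

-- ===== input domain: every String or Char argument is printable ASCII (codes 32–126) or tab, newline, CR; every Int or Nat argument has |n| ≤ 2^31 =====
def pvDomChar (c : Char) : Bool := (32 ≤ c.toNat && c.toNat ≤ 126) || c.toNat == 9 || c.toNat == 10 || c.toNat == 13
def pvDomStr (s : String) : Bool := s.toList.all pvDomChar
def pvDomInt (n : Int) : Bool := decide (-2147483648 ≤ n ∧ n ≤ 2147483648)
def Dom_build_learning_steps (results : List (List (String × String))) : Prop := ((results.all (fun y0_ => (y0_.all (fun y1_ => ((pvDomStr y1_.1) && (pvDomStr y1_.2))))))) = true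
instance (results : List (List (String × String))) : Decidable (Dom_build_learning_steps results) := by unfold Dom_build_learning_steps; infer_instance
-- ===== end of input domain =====

-- B replaces A's imperative enumerate-then-while-pad accumulation with one recursive
-- function counting n = 1..3 that consumes the list and cons-builds the output (objective: alternative).

-- ===== PORT A =====
-- item.get(k) or default, with Python's falsy rule for the empty string (exact: values are strings)
def pvGetOr (item : List (String × String)) (k dflt : String) : String :=
  match (PySem.Dict.mk item).get? k with
  | some v => if v = "" then dflt else v
  | none => dflt

def pvFmtResult (n : Int) (item : List (String × String)) : String :=
  PySem.Int.toStr n ++ ". Lies zuerst '" ++ pvGetOr item "title" "W3Schools Seite"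
    ++ "' und uebernimm ein Beispiel in dein Projekt: " ++ pvGetOr item "url" "https://www.w3schools.com/"

def pvPadStr (n : Int) : String :=
  PySem.Int.toStr n ++ ". Baue ein kleines Beispiel, teste es lokal und notiere, was sich aendert."

-- the while-loop: appends while len(steps) < 3; fuel 3 is exact (the loop runs at most 3 times)
def pvWhilePad : Nat → List String → List String
  | 0, steps => steps
  | f + 1, steps =>
      if steps.length < 3 then
        pvWhilePad f (steps ++ [pvPadStr ((steps.length : Int) + 1)])
      else steps

def build_learning_steps (results : List (List (String × String))) : List String :=
  let steps := (PySem.List.enumerate (PySem.List.slice results none (some 3)) 1).foldl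
      (fun steps p => steps ++ [pvFmtResult p.1 p.2]) []
  pvWhilePad 3 steps

-- ===== PORT B =====
-- Source B's recursion 'step(n, items)': guard 'n > 3' rendered as the fuel 4 - n (exact: n starts at 1)
def pvStep : Nat → Int → List (List (String × String)) → List String
  | 0, _, _ => []
  | f + 1, n, item :: tail => pvFmtResult n item :: pvStep f (n + 1) tail
  | f + 1, n, [] => pvPadStr n :: pvStep f (n + 1) []

def build_learning_steps_alt (results : List (List (String × String))) : List String :=
  pvStep 3 1 results

-- ===== PRECONDITION & SPEC =====
def Spec_build_learning_steps (results : List (List (String × String))) (out : List String) : Prop := out = build_learning_steps_alt results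
instance (results : List (List (String × String))) (out : List String) : Decidable (Spec_build_learning_steps results out) := by unfold Spec_build_learning_steps; infer_instance

-- ===== CLAIM (what is proved, stated in full; the proofs are below) =====
def Claim_equal_build_learning_steps : Prop := ∀ (results : List (List (String × String))), Dom_build_learning_steps results → Spec_build_learning_steps results (build_learning_steps results)

-- ===== LEMMAS AND PROOFS =====

-- ===== VERDICT (by name: the statement is the Claim_ definition above) =====
theorem build_learning_steps_spec : Claim_equal_build_learning_steps := by
  intro results _
  unfold Spec_build_learning_steps build_learning_steps build_learning_steps_alt
  match results with
  | [] => rfl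
  | [a] => rfl
  | [a, b] => rfl
  | a :: b :: c :: rest =>
      simp [PySem.List.slice, PySem.List.clampIdx, PySem.List.enumerate,
            pvWhilePad, pvStep]
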